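-- pv_equiv track=rewrite | github.com/Client-Specific-Equivalence-Checker/CLEVER | benchmarks/eq/non-client/digit10/digits10_upgr.py | lib
-- ===== SOURCE A (Python) =====
-- def lib(n):
--     result =1
--     counter = 1
--     b = 1
--     retval = -1
--
--     while ( b!= 0 ):
--        if (n < counter * 10):
--            retval = result
--            b =0
--        elif ( n < counter * 100):
--            retval  = result +1
--            b=0
--        elif (n < counter * 1000):
--            retval = result + 2
--            b=0
--        elif (n < counter * 10000):
--            retval = result + 3
--            b = 0
--        else:
--            counter = counter * 10000
--            result = result +4
--
--
--
--     return retval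
-- ===== SOURCE B (Python) =====
-- def lib(n):
--     # Divide and conquer: find the largest power p = 10**k with p <= n by
--     # repeated squaring, then the digit count is k plus the digits of n // p.
--     if n < 10:
--         return 1
--     p, k = 10, 1
--     while p * p <= n:
--         p *= p
--         k *= 2
--     return k + lib(n // p)
-- ===== Notes on version B (the rewrite author's own statement) =====
-- stated objective: alternative
-- what changed: Replaces A's linear threshold cascade (a counter scaled by ten thousand each pass) with a divide-and-conquer recursion: find the largest power of ten not exceeding n by repeated squaring, add its exponent, and recurse on the quotient of n by that power.
import Mathlib
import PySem

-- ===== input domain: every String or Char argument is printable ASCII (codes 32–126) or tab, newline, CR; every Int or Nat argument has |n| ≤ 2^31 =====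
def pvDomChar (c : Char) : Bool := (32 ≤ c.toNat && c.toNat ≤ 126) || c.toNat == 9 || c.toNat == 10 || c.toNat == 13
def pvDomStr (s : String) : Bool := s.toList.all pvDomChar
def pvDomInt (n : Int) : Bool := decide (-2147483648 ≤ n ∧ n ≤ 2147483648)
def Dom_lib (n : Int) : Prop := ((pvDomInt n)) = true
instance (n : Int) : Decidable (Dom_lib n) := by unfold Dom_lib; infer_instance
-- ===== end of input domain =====

-- B replaces A's threshold cascade (counter scaled by 10000 per pass) with a
-- divide-and-conquer recursion: find the largest power 10^k ≤ n by repeated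
-- squaring, add k, recurse on n // 10^k; same value for every Int (1 for n < 10).

-- Small named termination facts (cited by the ports' decreasing_by; kept above for that reason).
theorem pvMulPos (c : Int) (hc : 0 < c) : 0 < c * 10000 := Int.mul_pos hc (by decide)
theorem pvSqGe (p : Int) (hp : 2 ≤ p) : 2 ≤ p * p := by nlinarith
theorem pvLoopStep (n c : Int) (hc : 0 < c) (h : c * 10000 ≤ n) :
    (n - c * 10000).toNat < (n - c).toNat := by nlinarith [Int.toNat_of_nonneg (by omega : (0:Int) ≤ n - c*10000), Int.toNat_of_nonneg (by nlinarith : (0:Int) ≤ n - c)]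
theorem pvSqStep (n p : Int) (hp : 2 ≤ p) (h : p * p ≤ n) :
    (n - p * p).toNat < (n - p).toNat := by nlinarith [Int.toNat_of_nonneg (by omega : (0:Int) ≤ n - p*p), Int.toNat_of_nonneg (by nlinarith : (0:Int) ≤ n - p)]
theorem pvDivStep (n q : Int) (hn : 10 ≤ n) (hq : 10 ≤ q) : (n / q).toNat < n.toNat := by
  have h1 : n / q < n := by rw [Int.ediv_lt_iff_lt_mul (by omega)]; nlinarith
  have h2 : 0 ≤ n / q := Int.ediv_nonneg (by omega) (by omega)
  omega

-- ===== PORT A =====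
-- A's while-loop with the `b` exit flag: each iteration either sets retval and exits
-- (the four threshold branches, in order) or scales counter by 10000 and adds 4.
-- Terminates because counter > 0 grows while n is fixed (invariant 0 < counter).
def libLoop (n counter result : Int) (hc : 0 < counter) : Int :=
  if n < counter * 10 then result
  else if n < counter * 100 then result + 1
  else if n < counter * 1000 then result + 2
  else if n < counter * 10000 then result + 3
  else libLoop n (counter * 10000) (result + 4) (pvMulPos counter hc)
termination_by (n - counter).toNat
decreasing_by
  exact pvLoopStep n counter hc (by omega)

def lib (n : Int) : Int := libLoop n 1 1 (by decide)

-- ===== PORT B =====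
-- `while p * p <= n: p *= p; k *= 2` — the squaring search for the largest 10^k ≤ n.
-- Terminates since p ≥ 2 implies p < p*p (invariant 2 ≤ p, true at the call p = 10).
def powSearch (n p k : Int) (hp : 2 ≤ p) : Int × Int :=
  if p * p ≤ n then powSearch n (p * p) (k * 2) (pvSqGe p hp) else (p, k)
termination_by (n - p).toNat
decreasing_by
  exact pvSqStep n p hp (by omega)

-- The result's first component is at least the starting p (needed for termination of lib_alt).
theorem powSearch_fst_ge (n p k : Int) (hp : 2 ≤ p) : p ≤ (powSearch n p k hp).1 := by
  fun_induction powSearch n p k hp with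
  | case1 p k hp h ih => nlinarith
  | case2 p k hp h => simp

def lib_alt (n : Int) : Int :=
  if n < 10 then 1
  else
    let pk := powSearch n 10 1 (by decide)
    pk.2 + lib_alt (n / pk.1)
termination_by n.toNat
decreasing_by
  exact pvDivStep n _ (by omega) (powSearch_fst_ge n 10 1 (by decide))


-- ===== PRECONDITION & SPEC =====
def Spec_lib (n : Int) (out : Int) : Prop := out = lib_alt n
instance (n : Int) (out : Int) : Decidable (Spec_lib n out) := by unfold Spec_lib; infer_instance

-- ===== CLAIM (what is proved, stated in full; the proofs are below) =====
def Claim_equal_lib : Prop := ∀ (n : Int), Dom_lib n → Spec_lib n (lib n)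

-- ===== LEMMAS AND PROOFS =====

-- Reference digit count: one digit per division by 10.
def dcount (n : Int) : Int :=
  if 10 ≤ n then dcount (n / 10) + 1 else 1
termination_by n.toNat
decreasing_by
  exact pvDivStep n 10 (by omega) (by decide)

theorem dcount_eq (n : Int) : dcount n = if 10 ≤ n then dcount (n / 10) + 1 else 1 := by
  rw [dcount]

-- Peeling K digits at once.
theorem dcount_pow (K : ℕ) (n : Int) (h : (10:Int) ^ K ≤ n) :
    dcount n = K + dcount (n / 10 ^ K) := by
  induction K generalizing n with
  | zero => simp
  | succ K ih =>
    have hpow : (10:Int) ^ K ≤ n / 10 := by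
      rw [Int.le_ediv_iff_mul_le (by norm_num)]
      calc (10:Int) ^ K * 10 = 10 ^ (K + 1) := by ring
        _ ≤ n := h
    have hK : (1:Int) ≤ 10 ^ K := one_le_pow₀ (by norm_num)
    have h10 : (10:Int) ≤ n := by nlinarith [pow_succ (10:Int) K]
    rw [dcount_eq, if_pos h10, ih (n / 10) hpow]
    have : n / 10 / 10 ^ K = n / 10 ^ (K + 1) := by
      rw [Int.ediv_ediv_of_nonneg (by norm_num)]
      congr 1; ring
    rw [this]; push_cast; ring

-- powSearch started at a power of ten returns a power of ten that is ≤ n.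
theorem powSearch_spec (n p k : Int) (hp : 2 ≤ p) :
    ∀ (K : ℕ), p = 10 ^ K → k = (K : Int) → p ≤ n →
    ∃ M : ℕ, powSearch n p k hp = (10 ^ M, (M : Int)) ∧ (10:Int) ^ M ≤ n := by
  fun_induction powSearch n p k hp with
  | case1 p k hp h ih =>
    intro K hpk hkk hn
    exact ih (K + K) (by rw [hpk]; ring) (by rw [hkk]; push_cast; ring) h
  | case2 p k hp h =>
    intro K hpk hkk hn
    exact ⟨K, by rw [hpk, hkk], by rw [← hpk]; exact hn⟩

theorem lib_alt_eq_dcount (n : Int) : lib_alt n = dcount n := by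
  fun_induction lib_alt n with
  | case1 n h =>
    rw [dcount_eq, if_neg (by omega)]
  | case2 n h =>
    rename_i pk ih1
    obtain ⟨M, hps, hle⟩ :=
      powSearch_spec n 10 1 (by decide) 1 (by norm_num) (by norm_num) (by omega)
    have hpk : pk = ((10:Int) ^ M, (M : Int)) := hps
    rw [hpk] at ih1 ⊢
    rw [ih1, dcount_pow M n hle]

-- A's loop with counter c computes dcount of n / c, offset by result - 1.
theorem libLoop_eq_dcount (n counter result : Int) (hc : 0 < counter) :
    libLoop n counter result hc = dcount (n / counter) + (result - 1) := by
  fun_induction libLoop n counter result hc with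
  | case1 c r hc h1 =>
    rw [dcount_eq, if_neg (by rw [Int.le_ediv_iff_mul_le hc]; omega)]
    ring
  | case2 c r hc h1 h2 =>
    have hb1 : 10 ≤ n / c := by rw [Int.le_ediv_iff_mul_le hc]; omega
    have hb2 : n / c < 100 := by rw [Int.ediv_lt_iff_lt_mul hc]; omega
    rw [dcount_eq, if_pos hb1, dcount_eq, if_neg (by omega)]
    ring
  | case3 c r hc h1 h2 h3 =>
    have hb1 : 100 ≤ n / c := by rw [Int.le_ediv_iff_mul_le hc]; omega
    have hb2 : n / c < 1000 := by rw [Int.ediv_lt_iff_lt_mul hc]; omega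
    rw [dcount_eq, if_pos (by omega), dcount_eq, if_pos (by omega),
        dcount_eq, if_neg (by omega)]
    ring
  | case4 c r hc h1 h2 h3 h4 =>
    have hb1 : 1000 ≤ n / c := by rw [Int.le_ediv_iff_mul_le hc]; omega
    have hb2 : n / c < 10000 := by rw [Int.ediv_lt_iff_lt_mul hc]; omega
    rw [dcount_eq, if_pos (by omega), dcount_eq, if_pos (by omega),
        dcount_eq, if_pos (by omega), dcount_eq, if_neg (by omega)]
    ring
  | case5 c r hc h1 h2 h3 h4 ih =>
    have hb1 : 10000 ≤ n / c := by rw [Int.le_ediv_iff_mul_le hc]; omega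
    have hd : dcount (n / c) = 4 + dcount (n / c / 10 ^ 4) :=
      dcount_pow 4 (n / c) (by norm_num; omega)
    have hsplit : n / c / 10 ^ 4 = n / (c * 10000) := by
      rw [Int.ediv_ediv_of_nonneg (by omega : (0:Int) ≤ c)]
      norm_num
    rw [ih, hd, hsplit]
    ring

-- ===== VERDICT (by name: the statement is the Claim_ definition above) =====
theorem lib_spec : Claim_equal_lib := by
  intro n _
  unfold Spec_lib lib
  rw [libLoop_eq_dcount, Int.ediv_one, lib_alt_eq_dcount]
  ring
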